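-- pv_equiv track=rewrite | github.com/Cacatuaa/4Fun | faculdade/AP/ap2_programa3.py | Somar
-- ===== SOURCE A (Python) =====
-- def Somar(lista):
--     soma = 0
--     for i in range(0, len(lista)):
--         if i < len(lista)-1:
--             if lista[i] < lista[i+1]:
--                 soma -= lista[i]
--             else:
--                 soma += lista[i]
--         else:
--             soma += lista[i]
--     return soma
-- ===== SOURCE B (Python) =====
-- def Somar(lista):
--     # Arithmetic reformulation: start from the plain sum of the whole list, then
--     # apply a correction of -2*x for every element x smaller than its successor
--     # (turning its +x contribution into -x).  Two staged passes instead of A's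
--     # single pass that decides each element's sign in-loop.
--     total = sum(lista)
--     for i in range(1, len(lista)):
--         if lista[i-1] < lista[i]:
--             total -= 2 * lista[i-1]
--     return total
-- ===== Notes on version B (the rewrite author's own statement) =====
-- stated objective: alternative
-- what changed: Uses the algebraic identity result = sum(lista) - 2*sum of elements smaller than their successor: a plain full-list sum followed by a correction pass, instead of A's single loop that picks each element's sign with an in-loop boundary test.
import Mathlib
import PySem

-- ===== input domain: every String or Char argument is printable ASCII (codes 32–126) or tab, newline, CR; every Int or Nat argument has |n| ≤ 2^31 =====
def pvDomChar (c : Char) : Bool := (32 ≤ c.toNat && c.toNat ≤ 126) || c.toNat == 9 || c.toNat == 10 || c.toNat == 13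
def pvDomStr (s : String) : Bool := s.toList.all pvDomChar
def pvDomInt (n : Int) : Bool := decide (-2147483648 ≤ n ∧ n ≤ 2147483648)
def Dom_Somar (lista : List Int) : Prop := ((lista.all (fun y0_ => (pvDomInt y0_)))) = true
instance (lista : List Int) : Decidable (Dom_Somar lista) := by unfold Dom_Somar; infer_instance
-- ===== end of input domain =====

-- ===== PORT A =====
-- B replaces A's signed single pass by the identity sum(lista) - 2*Σ{ascending elements}: same O(n) cost, different decomposition.
def Somar (lista : List Int) : Int :=
  (PySem.List.pyRange 0 (lista.length : Int) 1).foldl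
    (fun soma i =>
      if i < (lista.length : Int) - 1 then
        if PySem.List.pyGetD lista i 0 < PySem.List.pyGetD lista (i + 1) 0 then
          soma - PySem.List.pyGetD lista i 0
        else
          soma + PySem.List.pyGetD lista i 0
      else
        soma + PySem.List.pyGetD lista i 0) 0

-- ===== PORT B =====
def Somar_alt (lista : List Int) : Int :=
  (PySem.List.pyRange 1 (lista.length : Int) 1).foldl
    (fun total i =>
      if PySem.List.pyGetD lista (i - 1) 0 < PySem.List.pyGetD lista i 0 then
        total - 2 * PySem.List.pyGetD lista (i - 1) 0
      else
        total) lista.sum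

-- ===== PRECONDITION & SPEC =====
def Spec_Somar (lista : List Int) (out : Int) : Prop := out = Somar_alt lista
instance (lista : List Int) (out : Int) : Decidable (Spec_Somar lista out) := by unfold Spec_Somar; infer_instance

-- ===== CLAIM (what is proved, stated in full; the proofs are below) =====
def Claim_equal_Somar : Prop := ∀ (lista : List Int), Dom_Somar lista → Spec_Somar lista (Somar lista)

-- ===== LEMMAS AND PROOFS =====

-- A's per-index contribution, as a function of the natural index
def somarTerm (l : List Int) (i : Nat) : Int :=
  if (i : Int) < (l.length : Int) - 1 then
    if l.getD i 0 < l.getD (i + 1) 0 then -(l.getD i 0) else l.getD i 0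
  else l.getD i 0

-- B's per-ascent correction, as a function of the natural index of the pair's first element
def corrTerm (l : List Int) (k : Nat) : Int :=
  if l.getD k 0 < l.getD (k + 1) 0 then -(2 * l.getD k 0) else 0

lemma somar_eq_sum (lista : List Int) :
    Somar lista = ((List.range lista.length).map (somarTerm lista)).sum := by
  unfold Somar
  rw [show ((lista.length : Int)) = ((lista.length : Nat) : Int) from rfl,
      PySem.List.pyRange_zero_natCast]
  have hbody : ∀ (soma : Int) (i : Int),
      (if i < (lista.length : Int) - 1 then
        if PySem.List.pyGetD lista i 0 < PySem.List.pyGetD lista (i + 1) 0 then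
          soma - PySem.List.pyGetD lista i 0
        else soma + PySem.List.pyGetD lista i 0
      else soma + PySem.List.pyGetD lista i 0)
      = soma + (if i < (lista.length : Int) - 1 then
          if PySem.List.pyGetD lista i 0 < PySem.List.pyGetD lista (i + 1) 0 then
            -(PySem.List.pyGetD lista i 0) else PySem.List.pyGetD lista i 0
        else PySem.List.pyGetD lista i 0) := by
    intro soma i; split_ifs <;> ring
  simp only [hbody]
  rw [PySem.List.foldl_add, zero_add, List.map_map]
  congr 1
  apply List.map_congr_left
  intro i _
  simp only [Function.comp, somarTerm, PySem.List.pyGetD_natCast]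
  congr 1
  rw [show ((i : Int) + 1) = (((i + 1 : Nat)) : Int) by push_cast; ring,
      PySem.List.pyGetD_natCast]

lemma alt_eq_sum (lista : List Int) :
    Somar_alt lista = lista.sum + ((List.range (lista.length - 1)).map (corrTerm lista)).sum := by
  unfold Somar_alt
  have hbody : ∀ (total : Int) (i : Int),
      (if PySem.List.pyGetD lista (i - 1) 0 < PySem.List.pyGetD lista i 0 then
        total - 2 * PySem.List.pyGetD lista (i - 1) 0 else total)
      = total + (if PySem.List.pyGetD lista (i - 1) 0 < PySem.List.pyGetD lista i 0 then
          -(2 * PySem.List.pyGetD lista (i - 1) 0) else 0) := by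
    intro total i; split_ifs <;> ring
  simp only [hbody]
  rw [PySem.List.foldl_add, PySem.List.pyRange_one, List.map_map]
  congr 1
  rw [show ((lista.length : Int) - 1).toNat = lista.length - 1 by omega]
  congr 1
  apply List.map_congr_left
  intro k _
  simp only [Function.comp, corrTerm]
  rw [show ((1 : Int) + k - 1) = ((k : Nat) : Int) by ring,
      show ((1 : Int) + k) = (((k + 1 : Nat)) : Int) by push_cast; ring,
      PySem.List.pyGetD_natCast, PySem.List.pyGetD_natCast]

-- pointwise: A's term = the plain element + B's correction (index below the last), or just the element (last index)
lemma term_decomp (l : List Int) (k : Nat) (hk : k < l.length) :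
    somarTerm l k = l.getD k 0 + (if k + 1 < l.length then corrTerm l k else 0) := by
  simp only [somarTerm, corrTerm]
  by_cases h : k + 1 < l.length
  · rw [if_pos (by omega), if_pos h]
    split_ifs <;> ring
  · rw [if_neg (by omega), if_neg h]
    ring

lemma sum_terms_split (l : List Int) :
    ((List.range l.length).map (somarTerm l)).sum
      = l.sum + ((List.range (l.length - 1)).map (corrTerm l)).sum := by
  have hsum : ((List.range l.length).map (fun k => l.getD k 0)).sum = l.sum := by
    congr 1
    apply List.ext_getElem (by simp)
    intro i h1 h2
    simp only [List.getElem_map, List.getElem_range]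
    exact List.getD_eq_getElem l 0 (by simpa using h2)
  calc ((List.range l.length).map (somarTerm l)).sum
      = ((List.range l.length).map
          (fun k => l.getD k 0 + (if k + 1 < l.length then corrTerm l k else 0))).sum := by
        congr 1
        apply List.map_congr_left
        intro k hk
        exact term_decomp l k (by simpa using hk)
    _ = ((List.range l.length).map (fun k => l.getD k 0)).sum
          + ((List.range l.length).map (fun k => if k + 1 < l.length then corrTerm l k else 0)).sum := by
        rw [← List.sum_map_add]
    _ = l.sum + ((List.range (l.length - 1)).map (corrTerm l)).sum := by
        rw [hsum]
        congr 1
        cases hn : l.length with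
        | zero => simp
        | succ m =>
          rw [List.range_succ, List.map_append, List.sum_append]
          simp only [List.map_cons, List.map_nil, List.sum_cons, List.sum_nil,
            Nat.add_sub_cancel]
          rw [if_neg (by omega), add_zero, add_zero]
          congr 1
          apply List.map_congr_left
          intro k hk
          rw [if_pos (by simp at hk; omega)]

-- ===== VERDICT (by name: the statement is the Claim_ definition above) =====
theorem Somar_spec : Claim_equal_Somar := by
  intro lista _
  unfold Spec_Somar
  rw [somar_eq_sum, sum_terms_split, alt_eq_sum]
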